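-- pv_equiv track=rewrite | github.com/arun-gupta/genai-labs | backend/app/api/routes.py | _extract_style_from_voice_name
-- ===== SOURCE A (Python) =====
-- def _extract_style_from_voice_name(voice_name: str) -> str:
--     """Extract speaking style from voice name."""
--     name_lower = voice_name.lower()
--
--     if any(word in name_lower for word in ["formal", "professional", "business"]):
--         return "formal"
--     elif any(word in name_lower for word in ["casual", "friendly", "conversational"]):
--         return "casual"
--     elif any(word in name_lower for word in ["excited", "energetic", "enthusiastic"]):
--         return "excited"
--     elif any(word in name_lower for word in ["calm", "relaxed", "gentle"]):
--         return "calm"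
--     else:
--         return "neutral"
-- ===== SOURCE B (Python) =====
-- _KEYWORD_STYLE = [
--     ("formal", "formal"), ("professional", "formal"), ("business", "formal"),
--     ("casual", "casual"), ("friendly", "casual"), ("conversational", "casual"),
--     ("excited", "excited"), ("energetic", "excited"), ("enthusiastic", "excited"),
--     ("calm", "calm"), ("relaxed", "calm"), ("gentle", "calm"),
-- ]
--
-- _PRIORITY = ("formal", "casual", "excited", "calm")
--
--
-- def _extract_style_from_voice_name(voice_name: str) -> str:
--     """Extract speaking style from voice name.
--
--     Single positional scan: at each position of the lowered name, record the
--     style of every keyword that starts there; then pick the highest-priority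
--     matched style.
--     """
--     s = voice_name.lower()
--     matched = set()
--     for i in range(len(s) + 1):
--         tail = s[i:]
--         for kw, style in _KEYWORD_STYLE:
--             if tail.startswith(kw):
--                 matched.add(style)
--     for style in _PRIORITY:
--         if style in matched:
--             return style
--     return "neutral"
-- ===== Notes on version B (the rewrite author's own statement) =====
-- stated objective: alternative
-- what changed: Replaced the if-elif cascade of substring tests by a single positional scan of the lowered name that accumulates the set of all matched styles (keyword startswith at each index), followed by a separate priority-order selection pass.
import Mathlib
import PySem

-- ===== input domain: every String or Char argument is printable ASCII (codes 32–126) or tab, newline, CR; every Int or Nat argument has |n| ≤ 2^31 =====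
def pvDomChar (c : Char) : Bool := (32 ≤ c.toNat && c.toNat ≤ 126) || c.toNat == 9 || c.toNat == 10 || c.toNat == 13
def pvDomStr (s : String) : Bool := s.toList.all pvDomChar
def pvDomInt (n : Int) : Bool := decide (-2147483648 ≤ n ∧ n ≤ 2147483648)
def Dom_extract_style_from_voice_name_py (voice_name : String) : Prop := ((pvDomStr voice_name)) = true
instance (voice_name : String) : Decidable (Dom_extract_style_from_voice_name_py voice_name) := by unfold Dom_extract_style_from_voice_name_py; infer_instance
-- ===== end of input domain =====

-- B replaces A's if-elif cascade of substring tests by one positional scan collecting the set of all matched styles, then a priority-order pick (alternative; same cost).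

-- ===== PORT A =====
def extract_style_from_voice_name_py (voice_name : String) : String :=
  let name_lower := PySem.Str.lower voice_name
  if (["formal", "professional", "business"] : List String).any (fun word => PySem.Str.isIn word name_lower) then
    "formal"
  else if (["casual", "friendly", "conversational"] : List String).any (fun word => PySem.Str.isIn word name_lower) then
    "casual"
  else if (["excited", "energetic", "enthusiastic"] : List String).any (fun word => PySem.Str.isIn word name_lower) then
    "excited"
  else if (["calm", "relaxed", "gentle"] : List String).any (fun word => PySem.Str.isIn word name_lower) then
    "calm"
  else
    "neutral"

-- ===== PORT B =====
def pvKeywordStyle : List (List Char × String) :=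
  [("formal".toList, "formal"), ("professional".toList, "formal"), ("business".toList, "formal"),
   ("casual".toList, "casual"), ("friendly".toList, "casual"), ("conversational".toList, "casual"),
   ("excited".toList, "excited"), ("energetic".toList, "excited"), ("enthusiastic".toList, "excited"),
   ("calm".toList, "calm"), ("relaxed".toList, "calm"), ("gentle".toList, "calm")]

def pvPriority : List String := ["formal", "casual", "excited", "calm"]

-- scan: for i in range(len(s)+1): for (kw, style) in table: if s[i:].startswith(kw): matched.add(style)
def pvScan (s : List Char) : PySem.Set String :=
  (List.range (s.length + 1)).foldl
    (fun acc i =>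
      pvKeywordStyle.foldl
        (fun a p => if PySem.Chars.startswith (s.drop i) p.1 then PySem.Set.add a p.2 else a)
        acc)
    PySem.Set.empty

def pvPick (styles : List String) (matched : PySem.Set String) : String :=
  match styles with
  | [] => "neutral"
  | st :: rest => if PySem.Set.contains matched st then st else pvPick rest matched

def extract_style_from_voice_name_py_alt (voice_name : String) : String :=
  let s := (PySem.Str.lower voice_name).toList
  pvPick pvPriority (pvScan s)

-- ===== PRECONDITION & SPEC =====
def Spec_extract_style_from_voice_name_py (voice_name : String) (out : String) : Prop := out = extract_style_from_voice_name_py_alt voice_name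
instance (voice_name : String) (out : String) : Decidable (Spec_extract_style_from_voice_name_py voice_name out) := by unfold Spec_extract_style_from_voice_name_py; infer_instance

-- ===== CLAIM (what is proved, stated in full; the proofs are below) =====
def Claim_equal_extract_style_from_voice_name_py : Prop := ∀ (voice_name : String), Dom_extract_style_from_voice_name_py voice_name → Spec_extract_style_from_voice_name_py voice_name (extract_style_from_voice_name_py voice_name)

-- ===== LEMMAS AND PROOFS =====

-- membership in the inner keyword fold
theorem pv_mem_inner (s : List Char) (i : Nat) (l : List (List Char × String))
    (acc : PySem.Set String) (st : String) :
    st ∈ l.foldl (fun a p => if PySem.Chars.startswith (s.drop i) p.1 then PySem.Set.add a p.2 else a) acc ↔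
      st ∈ acc ∨ ∃ p ∈ l, PySem.Chars.startswith (s.drop i) p.1 = true ∧ p.2 = st := by
  induction l generalizing acc with
  | nil => simp
  | cons hd tl ih =>
    simp only [List.foldl_cons, List.mem_cons]
    by_cases h : PySem.Chars.startswith (s.drop i) hd.1 = true
    · rw [if_pos h, ih]
      simp [PySem.Set.mem_add, h]
      tauto
    · rw [if_neg h, ih]
      constructor
      · rintro (ha | ⟨p, hp, hsw, he⟩)
        · exact Or.inl ha
        · exact Or.inr ⟨p, Or.inr hp, hsw, he⟩
      · rintro (ha | ⟨p, hp | hp, hsw, he⟩)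
        · exact Or.inl ha
        · exact absurd (hp ▸ hsw) h
        · exact Or.inr ⟨p, hp, hsw, he⟩

-- membership in the outer index fold
theorem pv_mem_scan_aux (s : List Char) (idxs : List Nat) (acc : PySem.Set String) (st : String) :
    st ∈ idxs.foldl
        (fun acc i =>
          pvKeywordStyle.foldl
            (fun a p => if PySem.Chars.startswith (s.drop i) p.1 then PySem.Set.add a p.2 else a)
            acc)
        acc ↔
      st ∈ acc ∨ ∃ i ∈ idxs, ∃ p ∈ pvKeywordStyle,
        PySem.Chars.startswith (s.drop i) p.1 = true ∧ p.2 = st := by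
  induction idxs generalizing acc with
  | nil => simp
  | cons hd tl ih =>
    simp only [List.foldl_cons, List.mem_cons]
    rw [ih, pv_mem_inner]
    constructor
    · rintro ((ha | ⟨p, hp, hsw, he⟩) | ⟨i, hi, hrest⟩)
      · exact Or.inl ha
      · exact Or.inr ⟨hd, Or.inl rfl, p, hp, hsw, he⟩
      · exact Or.inr ⟨i, Or.inr hi, hrest⟩
    · rintro (ha | ⟨i, hi | hi, hrest⟩)
      · exact Or.inl (Or.inl ha)
      · exact Or.inl (Or.inr (hi ▸ hrest))
      · exact Or.inr ⟨i, hi, hrest⟩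

-- a keyword starts at some scanned position iff it is a substring
theorem pv_exists_startswith (s kw : List Char) :
    (∃ i ∈ List.range (s.length + 1), PySem.Chars.startswith (s.drop i) kw = true) ↔
      PySem.Chars.isIn kw s = true := by
  rw [← PySem.Chars.exists_prefix_drop_iff_isIn]
  constructor
  · rintro ⟨i, _, h⟩
    exact ⟨i, (PySem.Chars.startswith_iff _ _).mp h⟩
  · rintro ⟨j, hj⟩
    by_cases hle : j ≤ s.length
    · exact ⟨j, List.mem_range.mpr (by omega), (PySem.Chars.startswith_iff _ _).mpr hj⟩
    · have hd : s.drop j = [] := List.drop_eq_nil_of_le (by omega)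
      have hkw : kw = [] := List.prefix_nil.mp (hd ▸ hj)
      exact ⟨0, List.mem_range.mpr (by omega),
        (PySem.Chars.startswith_iff _ _).mpr (hkw ▸ List.nil_prefix)⟩

theorem pv_mem_scan (s : List Char) (st : String) :
    st ∈ pvScan s ↔ ∃ p ∈ pvKeywordStyle, p.2 = st ∧ PySem.Chars.isIn p.1 s = true := by
  unfold pvScan
  rw [pv_mem_scan_aux]
  simp only [PySem.Set.empty]
  constructor
  · rintro (ha | ⟨i, hi, p, hp, hsw, he⟩)
    · simp at ha
    · exact ⟨p, hp, he, (pv_exists_startswith s p.1).mp ⟨i, hi, hsw⟩⟩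
  · rintro ⟨p, hp, he, hin⟩
    obtain ⟨i, hi, hsw⟩ := (pv_exists_startswith s p.1).mpr hin
    exact Or.inr ⟨i, hi, p, hp, hsw, he⟩

-- Set.contains for one style = membership characterisation
theorem pv_contains_scan (s : List Char) (st : String) :
    PySem.Set.contains (pvScan s) st = true ↔
      ∃ p ∈ pvKeywordStyle, p.2 = st ∧ PySem.Chars.isIn p.1 s = true := by
  rw [PySem.Set.contains_iff, pv_mem_scan]

theorem pv_contains_formal (s : List Char) :
    PySem.Set.contains (pvScan s) "formal" =
      (["formal", "professional", "business"] : List String).any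
        (fun word => PySem.Chars.isIn word.toList s) := by
  rw [Bool.eq_iff_iff, pv_contains_scan]
  simp [pvKeywordStyle]

theorem pv_contains_casual (s : List Char) :
    PySem.Set.contains (pvScan s) "casual" =
      (["casual", "friendly", "conversational"] : List String).any
        (fun word => PySem.Chars.isIn word.toList s) := by
  rw [Bool.eq_iff_iff, pv_contains_scan]
  simp [pvKeywordStyle]

theorem pv_contains_excited (s : List Char) :
    PySem.Set.contains (pvScan s) "excited" =
      (["excited", "energetic", "enthusiastic"] : List String).any
        (fun word => PySem.Chars.isIn word.toList s) := by
  rw [Bool.eq_iff_iff, pv_contains_scan]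
  simp [pvKeywordStyle]

theorem pv_contains_calm (s : List Char) :
    PySem.Set.contains (pvScan s) "calm" =
      (["calm", "relaxed", "gentle"] : List String).any
        (fun word => PySem.Chars.isIn word.toList s) := by
  rw [Bool.eq_iff_iff, pv_contains_scan]
  simp [pvKeywordStyle]

-- ===== VERDICT (by name: the statement is the Claim_ definition above) =====
theorem extract_style_from_voice_name_py_spec : Claim_equal_extract_style_from_voice_name_py := by
  intro voice_name _
  unfold Spec_extract_style_from_voice_name_py extract_style_from_voice_name_py
    extract_style_from_voice_name_py_alt pvPriority
  simp only [pvPick, PySem.Str.isIn_eq]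
  rw [pv_contains_formal, pv_contains_casual, pv_contains_excited, pv_contains_calm]
  rfl
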